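-- pv_equiv track=rewrite | github.com/pair0/Programmers | PCCP/외톨이 알파벳.py | solution
-- ===== SOURCE A (Python) =====
-- def solution(input_string):
--     answer = ""
--     check = []
--     k = 0
--     check.append(input_string[0])
--
--     for i in range(1, len(input_string)):
--         if check[k] != input_string[i]:
--             check.append(input_string[i])
--             k += 1
--
--     for i in sorted(set(check)):
--         if check.count(i) > 1:
--             answer += i
--
--     if len(answer) == 0:
--         answer = "N"
--
--     return answer
-- ===== SOURCE B (Python) =====
-- def solution(input_string):
--     cs = list(input_string)
--     n = len(cs)
--     rev = cs[::-1]
--     # a letter has more than one run iff its occurrences are not contiguous,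
--     # i.e. the span from its first to its last occurrence exceeds its count
--     answer = "".join(
--         c for c in sorted(set(cs))
--         if (n - 1 - rev.index(c)) - cs.index(c) + 1 > cs.count(c)
--     )
--     return answer if answer else "N"
-- ===== Notes on version B (the rewrite author's own statement) =====
-- stated objective: alternative
-- what changed: Replaced run-length compression plus a counting rescan by a direct per-letter occupancy test: a letter has more than one run iff its occurrence span (last index - first index + 1) exceeds its occurrence count, so B never builds a compressed list and keeps no run state.
import Mathlib
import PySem

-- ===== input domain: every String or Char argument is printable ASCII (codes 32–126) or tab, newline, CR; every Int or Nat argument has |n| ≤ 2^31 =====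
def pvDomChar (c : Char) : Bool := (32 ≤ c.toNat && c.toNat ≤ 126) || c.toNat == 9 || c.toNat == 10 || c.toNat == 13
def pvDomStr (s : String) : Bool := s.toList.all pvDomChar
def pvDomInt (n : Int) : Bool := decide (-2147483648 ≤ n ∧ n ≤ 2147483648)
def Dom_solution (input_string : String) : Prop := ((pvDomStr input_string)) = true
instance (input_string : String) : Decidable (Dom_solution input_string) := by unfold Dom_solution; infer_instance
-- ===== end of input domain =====

-- B replaces A's run-length compression + counting rescan by a direct per-letter test:
-- a letter has more than one run iff its occurrence span (last - first + 1) exceeds its count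
-- (objective: alternative algorithm, no compressed list and no run state).

-- ===== PORT A =====
-- first loop: build the run-compressed list `check`; `check[k]` compares against the last
-- appended char (k is always a valid index, so the IndexError branch of pyGet? is unreachable)
def solutionStepA (st : List Char × Nat) (c : Char) : List Char × Nat :=
  if (PySem.List.pyGet? st.1 (st.2 : Int)).getD c ≠ c then (st.1 ++ [c], st.2 + 1) else st

def solution (input_string : String) : String :=
  match input_string.toList with
  | [] => ""        -- Python: input_string[0] raises IndexError here (excluded by Pre_solution)
  | c0 :: rest =>
    let st := rest.foldl solutionStepA ([c0], 0)
    let check := st.1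
    let answer := (PySem.List.sorted (PySem.Set.ofList check) id).foldl
        (fun ans c => if check.count c > 1 then ans ++ [c] else ans) ([] : List Char)
    if answer = [] then "N" else String.ofList answer

-- ===== PORT B =====
-- cs[::-1] is list reversal; every c iterated comes from sorted(set(cs)), so c ∈ cs and the
-- ValueError branches of .index (PySem.List.index? = none) are unreachable: getD 0 is exact
def solution_alt (input_string : String) : String :=
  let cs := input_string.toList
  let n := cs.length
  let rev := cs.reverse
  let answer := (PySem.List.sorted (PySem.Set.ofList cs) id).filter (fun c =>
      decide ((((n : Int) - 1 - ((PySem.List.index? rev c).getD 0 : Int))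
                - ((PySem.List.index? cs c).getD 0 : Int) + 1) > (cs.count c : Int)))
  if answer = [] then "N" else String.ofList answer

-- ===== PRECONDITION & SPEC =====
-- Pre_ excludes only the empty string, on which A raises IndexError at input_string[0].
def Pre_solution (input_string : String) : Prop := input_string ≠ ""
instance (input_string : String) : Decidable (Pre_solution input_string) := by unfold Pre_solution; infer_instance
def pvWitness_solution : String := "aabba c"
def Spec_solution (input_string : String) (out : String) : Prop := out = solution_alt input_string
instance (input_string : String) (out : String) : Decidable (Spec_solution input_string out) := by unfold Spec_solution; infer_instance

-- ===== CLAIM (what is proved, stated in full; the proofs are below) =====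
def Claim_equal_solution : Prop := ∀ (input_string : String), Dom_solution input_string → Pre_solution input_string → Spec_solution input_string (solution input_string)

-- ===== LEMMAS AND PROOFS =====

-- the run-compressed tail (A's first loop as structural recursion)
def comp (p : Char) : List Char → List Char
  | [] => []
  | x :: xs => if x ≠ p then x :: comp x xs else comp p xs

-- number of run starts of c, given whether the previous char was c
def runStarts (c : Char) : Bool → List Char → Nat
  | _, [] => 0
  | prevC, x :: xs => (if x = c ∧ prevC = false then 1 else 0) + runStarts c (x == c) xs

-- index of first occurrence / last occurrence of c (meaningful when c ∈ l)
def firstIdx (c : Char) : List Char → Nat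
  | [] => 0
  | x :: xs => if x = c then 0 else firstIdx c xs + 1

def lastIdx (c : Char) : List Char → Nat
  | [] => 0
  | _ :: xs => if c ∈ xs then lastIdx c xs + 1 else 0

-- A's fold realises comp
lemma foldA (rest : List Char) : ∀ (acc : List Char), acc ≠ [] →
    rest.foldl solutionStepA (acc, acc.length - 1)
      = (acc ++ comp (acc.getLastD 'x') rest, (acc ++ comp (acc.getLastD 'x') rest).length - 1) := by
  induction rest with
  | nil => intro acc h; simp [comp]
  | cons x xs ih =>
    intro acc h
    have hlast : acc[acc.length - 1]? = some (acc.getLastD 'x') := by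
      rw [← List.getLast?_eq_getElem?, List.getLastD_eq_getLast?]
      cases hq : acc.getLast? with
      | none => exact absurd (List.getLast?_eq_none_iff.mp hq) h
      | some a => rfl
    have hA : solutionStepA (acc, acc.length - 1) x =
        (if acc.getLastD 'x' ≠ x then (acc ++ [x], acc.length - 1 + 1)
         else (acc, acc.length - 1)) := by
      simp only [solutionStepA, PySem.List.pyGet?_natCast, hlast, Option.getD_some]
    by_cases hx : x = acc.getLastD 'x'
    · have h0 : solutionStepA (acc, acc.length - 1) x = (acc, acc.length - 1) := by
        rw [hA, if_neg (not_not.mpr hx.symm)]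
      have hcomp : comp (acc.getLastD 'x') (x :: xs) = comp (acc.getLastD 'x') xs := by
        simp only [comp]
        rw [if_neg (not_not.mpr hx)]
      rw [List.foldl_cons, h0, hcomp]
      exact ih acc h
    · have h1 : solutionStepA (acc, acc.length - 1) x = (acc ++ [x], acc.length - 1 + 1) := by
        rw [hA, if_pos (fun e => hx e.symm)]
      have hlen : acc.length - 1 + 1 = (acc ++ [x]).length - 1 := by
        cases acc with
        | nil => exact absurd rfl h
        | cons _ _ => simp
      have hgl : (acc ++ [x]).getLastD 'x' = x := by
        simp [List.getLastD_eq_getLast?]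
      have hcomp : comp (acc.getLastD 'x') (x :: xs) = x :: comp x xs := by
        simp only [comp]
        rw [if_pos hx]
      have hstep := ih (acc ++ [x]) (by simp)
      rw [List.foldl_cons, h1, hlen, hstep, hgl, hcomp]
      simp

-- membership is preserved by compression
lemma mem_comp (l : List Char) : ∀ (p a : Char), a ∈ p :: comp p l ↔ a ∈ p :: l := by
  induction l with
  | nil => intro p a; simp [comp]
  | cons x xs ih =>
    intro p a
    by_cases hx : x = p
    · subst hx
      rw [show comp x (x :: xs) = comp x xs by simp [comp]]
      rw [ih x a]; simp
    · rw [show comp p (x :: xs) = x :: comp x xs by simp [comp, hx]]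
      have h2 := ih x a
      simp only [List.mem_cons] at h2 ⊢
      tauto

-- count in the compressed list = number of run starts
lemma compCount (rest : List Char) : ∀ (p c : Char),
    (comp p rest).count c = runStarts c (p == c) rest := by
  induction rest with
  | nil => intro p c; simp [comp, runStarts]
  | cons x xs ih =>
    intro p c
    by_cases hx : x = p
    · subst hx
      rw [show comp x (x :: xs) = comp x xs by simp [comp]]
      rw [ih x c]
      simp only [runStarts]
      by_cases h : x = c
      · subst h; simp
      · simp [h]
    · rw [show comp p (x :: xs) = x :: comp x xs by simp [comp, hx]]
      rw [List.count_cons, ih x c]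
      simp only [runStarts]
      by_cases hc : x = c
      · subst hc
        have hpx : (p == x) = false := beq_eq_false_iff_ne.mpr (fun e => hx e.symm)
        simp [hpx, Nat.add_comm]
      · simp [hc]

lemma runStarts_zero (c : Char) : ∀ (l : List Char), c ∉ l → ∀ b, runStarts c b l = 0 := by
  intro l
  induction l with
  | nil => intro _ _; rfl
  | cons x xs ih =>
    intro h b
    have hx : ¬ x = c := fun e => h (by simp [e])
    have hb : (x == c) = false := beq_eq_false_iff_ne.mpr hx
    simp [runStarts, hx, hb]
    exact ih (fun hm => h (by simp [hm])) false

lemma runStarts_pos (c : Char) : ∀ (l : List Char), c ∈ l → 1 ≤ runStarts c false l := by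
  intro l
  induction l with
  | nil => intro h; simp at h
  | cons x xs ih =>
    intro h
    by_cases hx : x = c
    · subst hx
      simp [runStarts]
    · have hm : c ∈ xs := by
        rcases List.mem_cons.mp h with h | h
        · exact absurd h.symm hx
        · exact h
      have hb : (x == c) = false := beq_eq_false_iff_ne.mpr hx
      simp [runStarts, hx, hb]
      exact ih hm

lemma count_le_lastIdx (c : Char) : ∀ (l : List Char), c ∈ l → l.count c ≤ lastIdx c l + 1 := by
  intro l
  induction l with
  | nil => intro h; simp at h
  | cons x xs ih =>
    intro h
    by_cases hm : c ∈ xs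
    · have hIH := ih hm
      by_cases hx : x = c
      · subst hx
        simp [lastIdx, hm, List.count_cons_self]
        omega
      · have hcx : ¬ c = x := fun e => hx e.symm
        simp [lastIdx, hm, hx]
        omega
    · have hx : x = c := by
        rcases List.mem_cons.mp h with h | h
        · exact h.symm
        · exact absurd h hm
      subst hx
      simp [lastIdx, hm, List.count_eq_zero.mpr hm]

lemma runStarts_true_iff (c : Char) : ∀ (l : List Char), c ∈ l →
    (1 ≤ runStarts c true l ↔ l.count c < lastIdx c l + 1) := by
  intro l
  induction l with
  | nil => intro h; simp at h
  | cons x xs ih =>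
    intro h
    by_cases hx : x = c
    · subst hx
      by_cases hm : x ∈ xs
      · have hIH := ih hm
        simp [runStarts, lastIdx, hm, List.count_cons_self]
        omega
      · simp [runStarts, lastIdx, hm, runStarts_zero x xs hm, List.count_eq_zero.mpr hm]
    · have hm : c ∈ xs := by
        rcases List.mem_cons.mp h with h | h
        · exact absurd h.symm hx
        · exact h
      have hb : (x == c) = false := beq_eq_false_iff_ne.mpr hx
      have hbc : (c == x) = false := beq_eq_false_iff_ne.mpr (fun e => hx e.symm)
      have h4 := count_le_lastIdx c xs hm
      have h5 := runStarts_pos c xs hm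
      simp [runStarts, lastIdx, hx, hb, hm]
      omega

lemma runStarts_two_iff (c : Char) : ∀ (l : List Char), c ∈ l →
    (2 ≤ runStarts c false l ↔ l.count c + firstIdx c l < lastIdx c l + 1) := by
  intro l
  induction l with
  | nil => intro h; simp at h
  | cons x xs ih =>
    intro h
    by_cases hx : x = c
    · subst hx
      by_cases hm : x ∈ xs
      · have h3 := runStarts_true_iff x xs hm
        simp [runStarts, lastIdx, firstIdx, hm, List.count_cons_self]
        omega
      · simp [runStarts, lastIdx, firstIdx, hm, runStarts_zero x xs hm,
          List.count_eq_zero.mpr hm]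
    · have hm : c ∈ xs := by
        rcases List.mem_cons.mp h with h | h
        · exact absurd h.symm hx
        · exact h
      have hb : (x == c) = false := beq_eq_false_iff_ne.mpr hx
      have hbc : (c == x) = false := beq_eq_false_iff_ne.mpr (fun e => hx e.symm)
      have hIH := ih hm
      simp [runStarts, lastIdx, firstIdx, hx, hb, hm]
      omega

-- bridges from the port's index?-expressions (c ∈ l)
lemma index?_getD_eq_firstIdx (c : Char) : ∀ (l : List Char), c ∈ l →
    (PySem.List.index? l c).getD 0 = firstIdx c l := by
  intro l
  induction l with
  | nil => intro h; simp at h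
  | cons x xs ih =>
    intro h
    by_cases hx : x = c
    · subst hx
      rw [PySem.List.index?_cons_self]
      simp [firstIdx]
    · have hm : c ∈ xs := by
        rcases List.mem_cons.mp h with h | h
        · exact absurd h.symm hx
        · exact h
      rw [PySem.List.index?_cons_of_ne _ hx]
      cases hq : PySem.List.index? xs c with
      | none => exact absurd ((PySem.List.index?_eq_none_iff xs c).mp hq) (by simpa using hm)
      | some k =>
        have hIH := ih hm
        rw [hq] at hIH
        simp only [Option.getD_some] at hIH
        simp [firstIdx, hx, hIH]

lemma index?_rev_eq_lastIdx (c : Char) : ∀ (l : List Char), c ∈ l →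
    (l.length : Int) - 1 - ((PySem.List.index? l.reverse c).getD 0 : Int) = (lastIdx c l : Int) := by
  intro l
  induction l with
  | nil => intro h; simp at h
  | cons x xs ih =>
    intro h
    by_cases hm : c ∈ xs
    · have hrev : PySem.List.index? (x :: xs).reverse c = PySem.List.index? xs.reverse c := by
        rw [List.reverse_cons]
        exact PySem.List.index?_append_of_mem _ (by simpa using hm)
      have hIH := ih hm
      rw [hrev]
      simp only [lastIdx, if_pos hm, List.length_cons]
      push_cast at hIH ⊢
      omega
    · have hx : x = c := by
        rcases List.mem_cons.mp h with h | h
        · exact h.symm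
        · exact absurd h hm
      subst hx
      have hrev : PySem.List.index? (x :: xs).reverse x = some xs.reverse.length := by
        rw [List.reverse_cons]
        exact PySem.List.index?_append_singleton_self _ _ (by simpa using hm)
      rw [hrev]
      simp [lastIdx, hm]

-- A's answer-building pass over the sorted distinct letters is a filter
lemma answer_pass (check L : List Char) :
    L.foldl (fun ans c => if check.count c > 1 then ans ++ [c] else ans) ([] : List Char)
      = L.filter (fun c => decide (check.count c > 1)) := by
  have := PySem.List.foldl_append_if (fun c => decide (check.count c > 1)) (id : Char → Char) L []
  simpa using this

-- ===== VERDICT (by name: the statement is the Claim_ definition above) =====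
theorem solution_spec : Claim_equal_solution := by
  intro s _ hpre
  unfold Spec_solution
  cases hs : s.toList with
  | nil => exact absurd (by simpa using hs) hpre
  | cons c0 rest =>
    have hfold := foldA rest [c0] (by simp)
    rw [show (([c0] : List Char).length - 1) = 0 from rfl,
        show (([c0] : List Char).getLastD 'x') = c0 from rfl] at hfold
    have hperm : (PySem.Set.ofList ([c0] ++ comp c0 rest)).Perm (PySem.Set.ofList (c0 :: rest)) := by
      rw [List.perm_ext_iff_of_nodup (PySem.Set.nodup_ofList _) (PySem.Set.nodup_ofList _)]
      intro a
      simp only [PySem.Set.mem_ofList, List.singleton_append]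
      exact mem_comp rest c0 a
    have hsorted : PySem.List.sorted (PySem.Set.ofList ([c0] ++ comp c0 rest)) id
        = PySem.List.sorted (PySem.Set.ofList (c0 :: rest)) id :=
      PySem.List.sorted_eq_sorted_of_perm _ _ _ (fun a b e => e) hperm
    have hfilter : (PySem.List.sorted (PySem.Set.ofList (c0 :: rest)) id).filter
          (fun c => decide (([c0] ++ comp c0 rest).count c > 1))
        = (PySem.List.sorted (PySem.Set.ofList (c0 :: rest)) id).filter (fun c =>
            decide (((((c0 :: rest).length : Int) - 1
                      - ((PySem.List.index? (c0 :: rest).reverse c).getD 0 : Int))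
                - ((PySem.List.index? (c0 :: rest) c).getD 0 : Int) + 1)
              > ((c0 :: rest).count c : Int))) := by
      apply List.filter_congr
      intro c hcmem
      have hc : c ∈ c0 :: rest :=
        (PySem.Set.mem_ofList _ _).mp ((PySem.List.mem_sorted _ _ _ _).mp hcmem)
      have h1 : ([c0] ++ comp c0 rest).count c = runStarts c false (c0 :: rest) := by
        rw [List.count_append, compCount rest c0 c]
        simp only [runStarts]
        by_cases h : c0 = c
        · subst h; simp
        · have hb : (c0 == c) = false := beq_eq_false_iff_ne.mpr h
          have hcb : ¬ c = c0 := fun e => h e.symm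
          simp [h, hb]
      have h2 := runStarts_two_iff c (c0 :: rest) hc
      rw [h1, index?_getD_eq_firstIdx c _ hc, index?_rev_eq_lastIdx c _ hc, decide_eq_decide]
      omega
    simp only [solution, solution_alt, hs, hfold, answer_pass, hsorted, hfilter]
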